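-- pv_equiv track=rewrite | github.com/noir1458/Problem_Solving | BOJ/BOJ20250200/1411.py | w_conv_pattern
-- ===== SOURCE A (Python) =====
-- def w_conv_pattern(w):
--     d = {}
--     val = 0
--     p = ''
--     for a in w:
--         if a not in d.keys():
--             d[a] = val
--             val+=1
--         p += str(d[a])
--     return p
-- ===== SOURCE B (Python) =====
-- def w_conv_pattern(w):
--     # rank of c = number of distinct characters strictly before c's first occurrence
--     return ''.join(str(len(set(w[:w.index(c)]))) for c in w)
-- ===== Notes on version B (the rewrite author's own statement) =====
-- stated objective: alternative
-- what changed: B drops A's incrementally-built dict/counter/accumulator entirely: each character's rank is computed independently as the number of distinct characters in the prefix before its first occurrence (len(set(w[:w.index(c)]))), trading A's linear one-pass state machine for a stateless per-character closed form that rescans the prefix.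
import Mathlib
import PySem

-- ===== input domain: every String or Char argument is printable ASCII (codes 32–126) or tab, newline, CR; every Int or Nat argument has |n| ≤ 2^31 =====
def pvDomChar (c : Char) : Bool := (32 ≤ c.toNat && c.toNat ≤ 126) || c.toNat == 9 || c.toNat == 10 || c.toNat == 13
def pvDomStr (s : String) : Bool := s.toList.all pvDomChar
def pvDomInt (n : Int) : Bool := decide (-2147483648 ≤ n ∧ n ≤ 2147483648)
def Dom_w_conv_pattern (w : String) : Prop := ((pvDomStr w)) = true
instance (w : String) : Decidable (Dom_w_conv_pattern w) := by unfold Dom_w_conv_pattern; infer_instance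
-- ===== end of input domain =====

-- B drops A's incrementally-built dict/counter/accumulator: each character's rank is computed
-- independently as the number of distinct characters before its first occurrence (objective: alternative).

-- ===== PORT A =====
-- A's loop body as a named step (state = (d, val, p)); p is kept as List Char, turned
-- into a String only at the end (Lean's own String.append is opaque to the kernel).
def pvStepA (st : PySem.Dict Char Int × Int × List Char) (a : Char) :
    PySem.Dict Char Int × Int × List Char :=
  let dv := if st.1.contains a then (st.1, st.2.1) else (st.1.insert a st.2.1, st.2.1 + 1)
  (dv.1, dv.2, st.2.2 ++ (PySem.Int.toStr (dv.1.getD a 0)).toList)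

def w_conv_pattern (w : String) : String :=
  let st := w.toList.foldl pvStepA (PySem.Dict.empty, 0, [])
  String.ofList st.2.2

-- ===== PORT B =====
-- str(len(set(w[:w.index(c)]))) for c in w; w.index always succeeds since c comes from w,
-- so the totality default of getD 0 is never used.
def w_conv_pattern_alt (w : String) : String :=
  PySem.Str.join "" (w.toList.map (fun c =>
    PySem.Int.toStr
      ((PySem.List.dedup (PySem.List.slice w.toList none
          (some (((PySem.List.index? w.toList c).getD 0 : Nat) : Int)))).length : Int)))

-- ===== PRECONDITION & SPEC =====
def Spec_w_conv_pattern (w : String) (out : String) : Prop := out = w_conv_pattern_alt w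
instance (w : String) (out : String) : Decidable (Spec_w_conv_pattern w out) := by unfold Spec_w_conv_pattern; infer_instance

-- ===== CLAIM (what is proved, stated in full; the proofs are below) =====
def Claim_equal_w_conv_pattern : Prop := ∀ (w : String), Dom_w_conv_pattern w → Spec_w_conv_pattern w (w_conv_pattern w)

-- ===== LEMMAS AND PROOFS =====

-- A's index table, as a literal association list: (char, its first-occurrence index).
def pvPairs (l : List Char) : List (Char × Int) :=
  (PySem.List.enumerate (PySem.List.dedup l)).map (fun p => (p.2, p.1))

def pvMk (l : List Char) : PySem.Dict Char Int := ⟨pvPairs l⟩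

-- A's accumulated output after processing l, expressed through the table.
def pvP (l : List Char) : List Char :=
  (l.map (fun c => (PySem.Int.toStr ((pvMk l).getD c 0)).toList)).flatten

theorem pv_keys_pvMk (l : List Char) : (pvMk l).keys = PySem.List.dedup l := by
  simp [pvMk, pvPairs, PySem.Dict.keys_mk, List.map_map, Function.comp_def,
    PySem.List.map_snd_enumerate]

theorem pv_contains_pvMk (l : List Char) (a : Char) :
    (pvMk l).contains a = decide (a ∈ l) := by
  rw [PySem.Dict.contains_eq_decide_mem_keys, pv_keys_pvMk]
  simp

theorem pv_dedup_snoc_mem {l : List Char} {a : Char} (h : a ∈ l) :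
    PySem.List.dedup (l ++ [a]) = PySem.List.dedup l := by
  have hm : a ∈ PySem.List.dedup l := (PySem.List.mem_dedup l a).mpr h
  have hc : PySem.Set.contains (PySem.List.dedup l) a = true := by
    simpa [PySem.Set.contains] using hm
  show PySem.Set.ofList (l ++ [a]) = _
  rw [PySem.Set.ofList, List.foldl_append, List.foldl_cons, List.foldl_nil]
  show PySem.Set.add (PySem.List.dedup l) a = _
  rw [PySem.Set.add, if_pos hc]

theorem pv_dedup_snoc_not_mem {l : List Char} {a : Char} (h : a ∉ l) :
    PySem.List.dedup (l ++ [a]) = PySem.List.dedup l ++ [a] := by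
  have hm : a ∉ PySem.List.dedup l := fun hx => h ((PySem.List.mem_dedup l a).mp hx)
  have hc : ¬ PySem.Set.contains (PySem.List.dedup l) a = true := by
    simpa [PySem.Set.contains] using hm
  show PySem.Set.ofList (l ++ [a]) = _
  rw [PySem.Set.ofList, List.foldl_append, List.foldl_cons, List.foldl_nil]
  show PySem.Set.add (PySem.List.dedup l) a = _
  rw [PySem.Set.add, if_neg hc]

theorem pv_pvMk_snoc_mem {l : List Char} {a : Char} (h : a ∈ l) :
    pvMk (l ++ [a]) = pvMk l := by
  unfold pvMk pvPairs
  rw [pv_dedup_snoc_mem h]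

theorem pv_pvMk_snoc_not_mem {l : List Char} {a : Char} (h : a ∉ l) :
    pvMk (l ++ [a]) = (pvMk l).insert a ((PySem.List.dedup l).length : Int) := by
  apply PySem.Dict.ext
  rw [PySem.Dict.items_insert_of_not_contains _ _ (by simp [pv_contains_pvMk, h])]
  show pvPairs (l ++ [a]) = pvPairs l ++ _
  unfold pvPairs
  rw [pv_dedup_snoc_not_mem h, PySem.List.enumerate_append]
  simp [PySem.List.enumerate_cons, PySem.List.enumerate_nil]

theorem pv_getD_pvMk_snoc {l : List Char} {a : Char} {c : Char} (hc : c ∈ l) :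
    (pvMk (l ++ [a])).getD c 0 = (pvMk l).getD c 0 := by
  by_cases h : a ∈ l
  · rw [pv_pvMk_snoc_mem h]
  · rw [pv_pvMk_snoc_not_mem h, PySem.Dict.getD_insert]
    have : c ≠ a := fun he => h (he ▸ hc)
    simp [this]

theorem pv_pvP_snoc (l : List Char) (a : Char) :
    pvP (l ++ [a]) = pvP l ++ (PySem.Int.toStr ((pvMk (l ++ [a])).getD a 0)).toList := by
  unfold pvP
  rw [List.map_append, List.flatten_append]
  congr 1
  · congr 1
    exact List.map_congr_left (fun c hc => by rw [pv_getD_pvMk_snoc hc])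
  · simp

-- The loop invariant of A's fold, by reverse induction on the processed prefix.
theorem pv_inv (l : List Char) :
    l.foldl pvStepA (PySem.Dict.empty, 0, []) =
      (pvMk l, ((PySem.List.dedup l).length : Int), pvP l) := by
  induction l using List.reverseRecOn with
  | nil =>
    simp [pvMk, pvPairs, pvP, PySem.List.dedup, PySem.Set.ofList, PySem.Set.empty,
      PySem.List.enumerate_nil, PySem.Dict.empty]
  | append_singleton l a ih =>
    rw [List.foldl_append, ih]
    by_cases h : a ∈ l
    · have hc : (pvMk l).contains a = true := by simp [pv_contains_pvMk, h]
      simp only [List.foldl_cons, List.foldl_nil, pvStepA, hc, if_true]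
      rw [pv_pvP_snoc, pv_pvMk_snoc_mem h, pv_dedup_snoc_mem h]
    · have hc : (pvMk l).contains a = false := by simp [pv_contains_pvMk, h]
      simp only [List.foldl_cons, List.foldl_nil, pvStepA, hc, Bool.false_eq_true, if_false]
      rw [pv_pvP_snoc, pv_pvMk_snoc_not_mem h, PySem.Dict.getD_insert_self,
        pv_dedup_snoc_not_mem h]
      simp

-- KEY: A's table value for c is the distinct-prefix count B computes from w.index(c).
theorem pv_key (l : List Char) :
    ∀ c ∈ l, (pvMk l).getD c 0 =
      ((PySem.List.dedup (l.take ((PySem.List.index? l c).getD 0))).length : Int) := by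
  induction l using List.reverseRecOn with
  | nil => intro c hc; cases hc
  | append_singleton l a ih =>
    intro c hc
    by_cases h : c ∈ l
    · rw [pv_getD_pvMk_snoc h, PySem.List.index?_append_of_mem [a] h]
      obtain ⟨k, hk⟩ := (PySem.List.index?_isSome_iff l c).mpr h |> Option.isSome_iff_exists.mp
      obtain ⟨hklt, -, -⟩ := PySem.List.getElem_of_index?_eq_some hk
      rw [hk, ih c h, hk]
      simp only [Option.getD_some]
      rw [List.take_append_of_le_length (le_of_lt hklt)]
    · have hca : c = a := by
        rcases List.mem_append.mp hc with h' | h'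
        · exact absurd h' h
        · simpa using h'
      subst hca
      rw [pv_pvMk_snoc_not_mem h, PySem.Dict.getD_insert_self,
        PySem.List.index?_append_singleton_self l c h]
      simp only [Option.getD_some]
      rw [List.take_left]

theorem pv_join_nil_flatten (xss : List (List Char)) :
    PySem.Chars.join [] xss = xss.flatten := by
  induction xss with
  | nil => rfl
  | cons x t ih =>
    cases t with
    | nil => simp [PySem.Chars.join, List.intercalate]
    | cons y s =>
      simp only [PySem.Chars.join, List.intercalate, List.intersperse] at *
      simp_all

-- ===== VERDICT (by name: the statement is the Claim_ definition above) =====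
theorem w_conv_pattern_spec : Claim_equal_w_conv_pattern := by
  intro w _
  show w_conv_pattern w = w_conv_pattern_alt w
  unfold w_conv_pattern w_conv_pattern_alt
  rw [pv_inv]
  show String.ofList (pvP w.toList) = PySem.Str.join "" _
  show _ = String.ofList (PySem.Chars.join "".toList _)
  have hnil : "".toList = ([] : List Char) := rfl
  rw [hnil, pv_join_nil_flatten]
  unfold pvP
  congr 1
  rw [List.map_map]
  apply congrArg List.flatten
  apply List.map_congr_left
  intro c hc
  simp only [Function.comp_def]
  rw [pv_key w.toList c hc, PySem.List.slice_to_natCast]
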